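-- pv_equiv track=rewrite | github.com/zzarbttoo/algorithm | baekjun/silver1/1105.py | solution
-- ===== SOURCE A (Python) =====
-- def solution(L, R):
--
--     count = 0
--
--     if len(R) == len(L):
--         for (i, j) in zip(L, R):
--             if i != j:
--                 break
--             if i == "8" and j == "8":
--                 count += 1
--
--
--     return count
-- ===== SOURCE B (Python) =====
-- def solution(L, R):
--     if len(L) != len(R):
--         return 0
--     k = 0
--     while k < len(L) and L[k] == R[k]:
--         k += 1
--     return L[:k].count("8")
-- ===== Notes on version B (the rewrite author's own statement) =====
-- stated objective: simpler
-- what changed: Replaces A's fused zip loop with inline break/count by two phases: find the common-prefix length, then count '8' in that prefix slice.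
import Mathlib
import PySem

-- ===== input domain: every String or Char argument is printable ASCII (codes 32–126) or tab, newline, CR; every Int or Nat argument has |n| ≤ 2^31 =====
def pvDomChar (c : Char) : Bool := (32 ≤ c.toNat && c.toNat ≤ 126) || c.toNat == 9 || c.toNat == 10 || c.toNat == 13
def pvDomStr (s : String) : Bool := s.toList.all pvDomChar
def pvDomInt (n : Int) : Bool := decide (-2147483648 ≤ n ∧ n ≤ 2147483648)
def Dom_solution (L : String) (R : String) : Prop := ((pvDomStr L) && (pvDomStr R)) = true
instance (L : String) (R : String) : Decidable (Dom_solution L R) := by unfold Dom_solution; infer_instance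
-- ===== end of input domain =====

-- B builds the common prefix length first, then counts '8' in the prefix (two phases instead of A's fused loop).
-- ===== PORT A =====
-- loop over zip(L,R) with break, counting positions where both chars are '8'
def solutionLoopA : List (Char × Char) → Int → Int
  | [], count => count
  | (i, j) :: rest, count =>
    if i ≠ j then count
    else solutionLoopA rest (if i = '8' ∧ j = '8' then count + 1 else count)

def solution (L : String) (R : String) : Int :=
  if R.length = L.length then solutionLoopA (L.toList.zip R.toList) 0 else 0

-- ===== PORT B =====
-- the while loop of Source B: length of the common prefix
def solutionPrefLen : List Char → List Char → Nat
  | a :: as, b :: bs => if a = b then solutionPrefLen as bs + 1 else 0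
  | _, _ => 0

def solution_alt (L : String) (R : String) : Int :=
  if L.length ≠ R.length then 0
  else ((L.toList.take (solutionPrefLen L.toList R.toList)).count '8' : Int)

-- ===== PRECONDITION & SPEC =====
def Spec_solution (L : String) (R : String) (out : Int) : Prop := out = solution_alt L R
instance (L : String) (R : String) (out : Int) : Decidable (Spec_solution L R out) := by unfold Spec_solution; infer_instance

-- ===== CLAIM (what is proved, stated in full; the proofs are below) =====
def Claim_equal_solution : Prop := ∀ (L : String) (R : String), Dom_solution L R → Spec_solution L R (solution L R)

-- ===== LEMMAS AND PROOFS =====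

-- ===== VERDICT (by name: the statement is the Claim_ definition above) =====
theorem loopA_eq (as bs : List Char) (c : Int) :
    solutionLoopA (as.zip bs) c =
      c + ((as.take (solutionPrefLen as bs)).count '8' : Int) := by
  induction as generalizing bs c with
  | nil => simp [solutionLoopA, solutionPrefLen]
  | cons a as ih =>
    cases bs with
    | nil => simp [solutionLoopA, solutionPrefLen]
    | cons b bs =>
      by_cases h : a = b
      · subst h
        by_cases h8 : a = '8'
        · simp [solutionLoopA, solutionPrefLen, h8, ih, List.count_cons]
          push_cast
          ring
        · simp [solutionLoopA, solutionPrefLen, h8, ih, List.count_cons]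
      · simp [solutionLoopA, solutionPrefLen, h, Ne.symm h]

theorem solution_spec : Claim_equal_solution := by
  intro L R _
  unfold Spec_solution solution solution_alt
  by_cases h : R.length = L.length
  · rw [if_pos h, if_neg (by omega), loopA_eq]
    simp
  · rw [if_neg h, if_pos (by omega)]
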